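-- pv_equiv track=rewrite | github.com/trastanechora/ata2018 | basic-programming 3/3-targetdekat.py | targetTerdekat
-- ===== SOURCE A (Python) =====
-- def targetTerdekat(arr):
--     xnum = []
--     onum = []
--     palingKecil = 100
--     if arr.count("x") != 0:
--         for i in range(len(arr)):
--             if arr[i] == "x":
--                 xnum.append(i)
--             if arr[i] == "o":
--                 onum.append(i)
--         for i in xnum:
--             for y in onum:
--                 kecil = i - y
--                 if palingKecil > abs(kecil):
--                     palingKecil = abs(kecil)
--     else:
--         palingKecil = 0
--     return(palingKecil)
-- ===== SOURCE B (Python) =====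
-- def targetTerdekat(arr):
--     # One pass: track the last seen 'x' and 'o' indices; the closest x/o pair
--     # is always realised against the most recent opposite symbol.
--     if "x" not in arr:
--         return 0
--     best = 100
--     last_x = None
--     last_o = None
--     for i, c in enumerate(arr):
--         if c == "x":
--             last_x = i
--             if last_o is not None and i - last_o < best:
--                 best = i - last_o
--         elif c == "o":
--             last_o = i
--             if last_x is not None and i - last_x < best:
--                 best = i - last_x
--     return best
-- ===== Notes on version B (the rewrite author's own statement) =====
-- stated objective: alternative
-- what changed: Replaces the index-collection pass plus nested loop over all x/o index pairs with a single pass that tracks the last seen 'x' and 'o' indices and updates the running minimum against the most recent opposite symbol.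
import Mathlib
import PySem

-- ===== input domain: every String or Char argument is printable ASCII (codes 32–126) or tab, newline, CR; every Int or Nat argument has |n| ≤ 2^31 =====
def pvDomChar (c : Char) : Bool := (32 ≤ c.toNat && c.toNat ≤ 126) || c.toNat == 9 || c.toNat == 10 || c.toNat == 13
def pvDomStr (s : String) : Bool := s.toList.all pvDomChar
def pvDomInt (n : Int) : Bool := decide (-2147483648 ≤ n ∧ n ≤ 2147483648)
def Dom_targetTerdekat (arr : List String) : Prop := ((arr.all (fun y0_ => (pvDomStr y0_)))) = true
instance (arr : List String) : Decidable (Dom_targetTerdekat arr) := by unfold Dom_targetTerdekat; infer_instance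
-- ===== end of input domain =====

-- B replaces A's index-collection pass plus nested loop over all x-index/o-index pairs
-- by a single pass tracking the last seen "x" and "o" indices (objective: alternative).

-- ===== PORT A =====
def targetTerdekat (arr : List String) : Int :=
  if PySem.List.count arr "x" ≠ 0 then
    -- the collection loop: for i in range(len(arr)), two independent ifs on arr[i]
    let st := (PySem.List.pyRange 0 (arr.length : Int) 1).foldl
      (fun (st : List Int × List Int) i =>
        let s := PySem.List.pyGetD arr i ""   -- arr[i]; i is always in range here
        let st := if s = "x" then (st.1 ++ [i], st.2) else st
        if s = "o" then (st.1, st.2 ++ [i]) else st)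
      ([], [])
    -- the nested pair loop updating palingKecil
    st.1.foldl (fun p i => st.2.foldl (fun p y =>
        let kecil := i - y
        if p > |kecil| then |kecil| else p) p) 100
  else 0

-- ===== PORT B =====
def targetTerdekat_alt (arr : List String) : Int :=
  if arr.contains "x" = false then 0
  else
    (((PySem.List.enumerate arr 0).foldl
      (fun (st : Int × Option Int × Option Int) ic =>
        let best := st.1; let lx := st.2.1; let lo := st.2.2
        let i := ic.1; let c := ic.2
        if c = "x" then
          ((match lo with
            | some j => if i - j < best then i - j else best
            | none => best), some i, lo)
        else if c = "o" then
          ((match lx with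
            | some j => if i - j < best then i - j else best
            | none => best), lx, some i)
        else (best, lx, lo))
      (100, none, none))).1

-- ===== PRECONDITION & SPEC =====
def Spec_targetTerdekat (arr : List String) (out : Int) : Prop := out = targetTerdekat_alt arr
instance (arr : List String) (out : Int) : Decidable (Spec_targetTerdekat arr out) := by unfold Spec_targetTerdekat; infer_instance

-- ===== CLAIM (what is proved, stated in full; the proofs are below) =====
def Claim_equal_targetTerdekat : Prop := ∀ (arr : List String), Dom_targetTerdekat arr → Spec_targetTerdekat arr (targetTerdekat arr)

-- ===== LEMMAS AND PROOFS =====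

/-- min-fold -/
def fmin (b : Int) (l : List Int) : Int := l.foldl min b

/-- all |x - y| distances between the two index lists -/
def dists (X O : List Int) : List Int := X.flatMap (fun i => O.map (fun y => |i - y|))

/-- indices (counting from n) of the occurrences of c -/
def idxOf (c : String) : List String → Int → List Int
  | [], _ => []
  | s :: t, n => if s = c then n :: idxOf c t (n + 1) else idxOf c t (n + 1)

/-- B's loop body, named for the proofs (definitionally the lambda in `targetTerdekat_alt`) -/
def bstep (st : Int × Option Int × Option Int) (ic : Int × String) : Int × Option Int × Option Int :=
  let best := st.1; let lx := st.2.1; let lo := st.2.2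
  let i := ic.1; let c := ic.2
  if c = "x" then
    ((match lo with
      | some j => if i - j < best then i - j else best
      | none => best), some i, lo)
  else if c = "o" then
    ((match lx with
      | some j => if i - j < best then i - j else best
      | none => best), lx, some i)
  else (best, lx, lo)

lemma alt_eq (arr : List String) :
    targetTerdekat_alt arr =
      if arr.contains "x" = false then 0
      else ((PySem.List.enumerate arr 0).foldl bstep (100, none, none)).1 := rfl

lemma if_lt_eq_min (a b : Int) : (if a < b then a else b) = min b a := by
  rw [min_def]; split_ifs <;> omega

lemma fmin_append (b : Int) (l1 l2 : List Int) : fmin b (l1 ++ l2) = fmin (fmin b l1) l2 := by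
  simp [fmin, List.foldl_append]

lemma fmin_min (b c : Int) (l : List Int) : fmin (min b c) l = min (fmin b l) c := by
  induction l generalizing b with
  | nil => simp [fmin]
  | cons x t ih =>
      show fmin (min (min b c) x) t = min (fmin (min b x) t) c
      rw [show min (min b c) x = min (min b x) c by omega, ih]

lemma fmin_const (c : Int) (l : List Int) (h : ∀ x ∈ l, c ≤ x) : fmin c l = c := by
  induction l with
  | nil => rfl
  | cons x t ih =>
      show fmin (min c x) t = c
      rw [show min c x = c by have := h x (by simp); omega]
      exact ih (fun x hx => h x (by simp [hx]))

lemma fmin_mem_min (b a : Int) (l : List Int) (h1 : a ∈ l) (h2 : ∀ x ∈ l, a ≤ x) :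
    fmin b l = min b a := by
  induction l generalizing b with
  | nil => simp at h1
  | cons x t ih =>
      show fmin (min b x) t = min b a
      by_cases hm : a ∈ t
      · rw [ih (min b x) hm (fun y hy => h2 y (by simp [hy]))]
        have := h2 x (by simp); omega
      · have hax : a = x := by rcases List.mem_cons.mp h1 with h | h; exact h; exact absurd h hm
        subst hax
        rw [fmin_const (min b a) t (fun y hy => by have := h2 y (by simp [hy]); omega)]

lemma inner_eq (O : List Int) (p i : Int) :
    O.foldl (fun p y => let kecil := i - y; if p > |kecil| then |kecil| else p) p
      = fmin p (O.map (fun y => |i - y|)) := by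
  induction O generalizing p with
  | nil => rfl
  | cons y t ih =>
      show t.foldl _ (if p > |i - y| then |i - y| else p) = fmin (min p |i - y|) (t.map _)
      rw [show (if p > |i - y| then |i - y| else p) = min p |i - y| by
        rw [min_def]; split_ifs <;> omega]
      exact ih _

lemma nested_eq (X O : List Int) (b : Int) :
    X.foldl (fun p i => O.foldl (fun p y => let kecil := i - y; if p > |kecil| then |kecil| else p) p) b
      = fmin b (dists X O) := by
  induction X generalizing b with
  | nil => rfl
  | cons x t ih =>
      show t.foldl _ (O.foldl _ b) = fmin b (dists (x :: t) O)
      rw [ih, inner_eq,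
        show dists (x :: t) O = (O.map fun y => |x - y|) ++ dists t O by simp [dists],
        fmin_append]

lemma fmin_flatMap_snoc (X : List Int) (b : Int) (A : Int → List Int) (g : Int → Int) :
    fmin b (X.flatMap (fun i => A i ++ [g i]))
      = fmin (fmin b (X.flatMap A)) (X.map g) := by
  induction X generalizing b with
  | nil => rfl
  | cons x t ih =>
      rw [List.flatMap_cons, List.flatMap_cons, List.map_cons, List.append_assoc,
        fmin_append, fmin_append,
        show fmin (fmin b (A x)) [g x] = min (fmin b (A x)) (g x) from rfl, ih, fmin_min,
        fmin_append b (A x)]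
      rfl

lemma dists_snoc_x (X O : List Int) (n : Int) :
    dists (X ++ [n]) O = dists X O ++ O.map (fun y => |n - y|) := by
  simp [dists]

lemma fmin_dists_snoc_o (X O : List Int) (b n : Int) :
    fmin b (dists X (O ++ [n])) = fmin (fmin b (dists X O)) (X.map (fun i => |i - n|)) := by
  rw [show dists X (O ++ [n])
        = X.flatMap (fun i => (O.map fun y => |i - y|) ++ [|i - n|]) by simp [dists],
    fmin_flatMap_snoc]
  rfl

/-- the collection fold of port A builds exactly the two index lists -/
lemma collect_eq (l : List String) (n : Int) (ax ao : List Int) :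
    (PySem.List.enumerate l n).foldl
      (fun (st : List Int × List Int) (p : Int × String) =>
        let s := p.2
        let st := if s = "x" then (st.1 ++ [p.1], st.2) else st
        if s = "o" then (st.1, st.2 ++ [p.1]) else st)
      (ax, ao)
      = (ax ++ idxOf "x" l n, ao ++ idxOf "o" l n) := by
  induction l generalizing n ax ao with
  | nil => simp [PySem.List.enumerate_nil, idxOf]
  | cons s t ih =>
      rw [PySem.List.enumerate_cons, List.foldl_cons]
      by_cases hx : s = "x"
      · subst hx
        simp only [if_neg (show ¬ ("x" : String) = "o" by decide)]
        rw [ih]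
        simp [idxOf]
      · by_cases ho : s = "o"
        · subst ho
          simp only [if_neg (show ¬ ("o" : String) = "x" by decide)]
          rw [ih]
          simp [idxOf]
        · simp only [if_neg hx, if_neg ho]
          rw [ih]
          simp [idxOf, hx, ho]

/-- an Option holding the maximum of the list (none iff empty) -/
def MaxOpt (l : List Int) : Option Int → Prop
  | none => l = []
  | some m => m ∈ l ∧ ∀ x ∈ l, x ≤ m

/-- the one-pass loop of port B computes the capped minimum pair distance -/
lemma loop_inv (l : List String) (n : Int) (X O : List Int) (lx lo : Option Int)
    (hXn : ∀ i ∈ X, i < n) (hOn : ∀ y ∈ O, y < n)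
    (hlx : MaxOpt X lx) (hlo : MaxOpt O lo) :
    ((PySem.List.enumerate l n).foldl bstep (fmin 100 (dists X O), lx, lo)).1
      = fmin 100 (dists (X ++ idxOf "x" l n) (O ++ idxOf "o" l n)) := by
  induction l generalizing n X O lx lo with
  | nil => simp [PySem.List.enumerate_nil, idxOf]
  | cons c t ih =>
      rw [PySem.List.enumerate_cons, List.foldl_cons]
      by_cases hx : c = "x"
      · subst hx
        rcases lo with _ | m
        · have hO : O = [] := hlo
          subst hO
          have hstep : bstep (fmin 100 (dists X []), lx, none) (n, "x")
              = (fmin 100 (dists (X ++ [n]) []), some n, none) := by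
            show (fmin 100 (dists X []), some n, (none : Option Int))
              = (fmin 100 (dists (X ++ [n]) []), some n, none)
            simp [dists]
          have h1 : ∀ i ∈ X ++ [n], i < n + 1 := by
            intro i hi
            rcases List.mem_append.mp hi with h | h
            · have := hXn i h; omega
            · simp at h; omega
          have h3 : MaxOpt (X ++ [n]) (some n) :=
            ⟨by simp, fun i hi => by have := h1 i hi; omega⟩
          rw [hstep, ih (n + 1) (X ++ [n]) [] (some n) none h1 (by simp) h3 rfl]
          simp [idxOf]
        · have hstep : bstep (fmin 100 (dists X O), lx, some m) (n, "x")
              = (fmin 100 (dists (X ++ [n]) O), some n, some m) := by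
            show ((if n - m < fmin 100 (dists X O) then n - m else fmin 100 (dists X O)),
                some n, some (m : Int))
              = (fmin 100 (dists (X ++ [n]) O), some n, some m)
            obtain ⟨hmem, hub⟩ := hlo
            have hmap : O.map (fun y => |n - y|) = O.map (fun y => n - y) :=
              List.map_congr_left (fun y hy => abs_of_nonneg (by have := hOn y hy; omega))
            rw [dists_snoc_x, fmin_append, hmap, fmin_mem_min _ (n - m) _
              (List.mem_map.mpr ⟨m, hmem, rfl⟩)
              (by rintro x hx'; obtain ⟨y, hy, rfl⟩ := List.mem_map.mp hx'
                  have := hub y hy; omega),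
              if_lt_eq_min (n - m) (fmin 100 (dists X O))]
          have h1 : ∀ i ∈ X ++ [n], i < n + 1 := by
            intro i hi
            rcases List.mem_append.mp hi with h | h
            · have := hXn i h; omega
            · simp at h; omega
          have h2 : ∀ y ∈ O, y < n + 1 := fun y hy => by have := hOn y hy; omega
          have h3 : MaxOpt (X ++ [n]) (some n) :=
            ⟨by simp, fun i hi => by have := h1 i hi; omega⟩
          rw [hstep, ih (n + 1) (X ++ [n]) O (some n) (some m) h1 h2 h3 hlo]
          simp [idxOf]
      · by_cases ho : c = "o"
        · subst ho
          rcases lx with _ | m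
          · have hX : X = [] := hlx
            subst hX
            have hstep : bstep (fmin 100 (dists [] O), none, lo) (n, "o")
                = (fmin 100 (dists [] (O ++ [n])), none, some n) := by
              show (fmin 100 (dists [] O), (none : Option Int), some n)
                = (fmin 100 (dists [] (O ++ [n])), none, some n)
              simp [dists]
            have h2 : ∀ y ∈ O ++ [n], y < n + 1 := by
              intro y hy
              rcases List.mem_append.mp hy with h | h
              · have := hOn y h; omega
              · simp at h; omega
            have h3 : MaxOpt (O ++ [n]) (some n) :=
              ⟨by simp, fun y hy => by have := h2 y hy; omega⟩
            rw [hstep, ih (n + 1) [] (O ++ [n]) none (some n) (by simp) h2 rfl h3]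
            simp [idxOf]
          · have hstep : bstep (fmin 100 (dists X O), some m, lo) (n, "o")
                = (fmin 100 (dists X (O ++ [n])), some m, some n) := by
              show ((if n - m < fmin 100 (dists X O) then n - m else fmin 100 (dists X O)),
                  some (m : Int), some n)
                = (fmin 100 (dists X (O ++ [n])), some m, some n)
              obtain ⟨hmem, hub⟩ := hlx
              have hmap : X.map (fun i => |i - n|) = X.map (fun i => n - i) :=
                List.map_congr_left (fun i hi => by
                  rw [abs_sub_comm]
                  exact abs_of_nonneg (by have := hXn i hi; omega))
              rw [fmin_dists_snoc_o, hmap, fmin_mem_min _ (n - m) _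
                (List.mem_map.mpr ⟨m, hmem, rfl⟩)
                (by rintro x hx'; obtain ⟨i, hi, rfl⟩ := List.mem_map.mp hx'
                    have := hub i hi; omega),
                if_lt_eq_min (n - m) (fmin 100 (dists X O))]
            have h1 : ∀ i ∈ X, i < n + 1 := fun i hi => by have := hXn i hi; omega
            have h2 : ∀ y ∈ O ++ [n], y < n + 1 := by
              intro y hy
              rcases List.mem_append.mp hy with h | h
              · have := hOn y h; omega
              · simp at h; omega
            have h3 : MaxOpt (O ++ [n]) (some n) :=
              ⟨by simp, fun y hy => by have := h2 y hy; omega⟩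
            rw [hstep, ih (n + 1) X (O ++ [n]) (some m) (some n) h1 h2 hlx h3]
            simp [idxOf]
        · have hstep : bstep (fmin 100 (dists X O), lx, lo) (n, c)
              = (fmin 100 (dists X O), lx, lo) := by
            simp [bstep, hx, ho]
          rw [hstep,
            ih (n + 1) X O lx lo
              (fun i hi => by have := hXn i hi; omega)
              (fun y hy => by have := hOn y hy; omega)
              hlx hlo]
          simp [idxOf, hx, ho]

-- ===== VERDICT (by name: the statement is the Claim_ definition above) =====
theorem targetTerdekat_spec : Claim_equal_targetTerdekat := by
  intro arr _
  show targetTerdekat arr = targetTerdekat_alt arr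
  rw [alt_eq]
  by_cases hmem : "x" ∈ arr
  · have hcontains : arr.contains "x" = true := by simpa using hmem
    have hcount : PySem.List.count arr "x" ≠ 0 := by
      rw [PySem.List.count_eq]
      simp [List.count_eq_zero, hmem]
    have hfold : (PySem.List.pyRange 0 (arr.length : Int) 1).foldl
        (fun (st : List Int × List Int) i =>
          let s := PySem.List.pyGetD arr i ""
          let st := if s = "x" then (st.1 ++ [i], st.2) else st
          if s = "o" then (st.1, st.2 ++ [i]) else st) ([], [])
        = (idxOf "x" arr 0, idxOf "o" arr 0) := by
      have h := collect_eq arr 0 [] []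
      simp only [List.nil_append] at h
      rw [PySem.List.enumerate_eq_map_pyRange (d := ""), List.foldl_map] at h
      exact h
    have hB := loop_inv arr 0 [] [] none none (by simp) (by simp) rfl rfl
    simp only [List.nil_append] at hB
    unfold targetTerdekat
    rw [if_pos hcount, hcontains]
    simp only [Bool.true_eq_false, if_false]
    rw [hfold]
    show (idxOf "x" arr 0).foldl
      (fun p i => (idxOf "o" arr 0).foldl (fun p y =>
        let kecil := i - y
        if p > |kecil| then |kecil| else p) p) 100 = _
    rw [nested_eq]
    exact hB.symm
  · have hcontains : arr.contains "x" = false := by simpa using hmem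
    have hcount : ¬ PySem.List.count arr "x" ≠ 0 := by
      rw [PySem.List.count_eq]
      simp [List.count_eq_zero, hmem]
    rw [targetTerdekat, if_neg hcount, hcontains, if_pos rfl]
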